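-- pv_equiv track=rewrite | github.com/eltonvs/code-training | vanhack/python/angry-animals/angry_animals.py | angry_animals
-- ===== SOURCE A (Python) =====
-- def angry_animals(n, a, b):
--     enemies_dict = {}
--     for pair in zip(a, b):
--         x, y = min(pair), max(pair)
--         enemies_dict.setdefault(y, set()).add(x)
--
--     ini, end = 0, 0
--     groups_count = 0
--     for i in range(1, n + 1):
--         if end <= ini:
--             groups_count += 1
--             end += 1
--             continue
--         i_enemies = enemies_dict.get(i, set())
--         next_enemy = lambda: max(i_enemies)
--         while end > ini and i_enemies and ini + 1 <= next_enemy() and end >= next_enemy():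
--             if ini + 1 >= next_enemy():
--                 i_enemies.remove(next_enemy())
--             # Ignore first animal from queue
--             ini += 1
--             groups_count += end - ini
--         # Grab the next animal
--         end += 1
--         groups_count += 1
--
--     animals_partition_size = end - ini
--     # Possibilities for remaining elements
--     groups_count += animals_partition_size * (animals_partition_size - 1) // 2
--
--     return groups_count
-- ===== SOURCE B (Python) =====
-- def angry_animals(n, a, b):
--     # For each animal index hi, remember only the largest lower enemy index.
--     max_lower = {}
--     for p, q in zip(a, b):
--         lo, hi = (p, q) if p < q else (q, p)
--         prev = max_lower.get(hi)
--         if prev is None or prev < lo: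
--             max_lower[hi] = lo
--
--     count = 0
--     left = 1
--     for r in range(1, n + 1):
--         e = max_lower.get(r)
--         if e is not None and left <= e < r:
--             left = e + 1
--         count += r - left + 1
--     return count
-- ===== Notes on version B (the rewrite author's own statement) =====
-- stated objective: simpler
-- what changed: Replaces A's mutating enemy-set dict, stateful ini/end window with an inner while loop and a trailing combinatorial term by a table of each index's maximum lower enemy plus a single monotonic left-pointer sweep that adds the window size r-left+1 at each step.
import Mathlib
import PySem

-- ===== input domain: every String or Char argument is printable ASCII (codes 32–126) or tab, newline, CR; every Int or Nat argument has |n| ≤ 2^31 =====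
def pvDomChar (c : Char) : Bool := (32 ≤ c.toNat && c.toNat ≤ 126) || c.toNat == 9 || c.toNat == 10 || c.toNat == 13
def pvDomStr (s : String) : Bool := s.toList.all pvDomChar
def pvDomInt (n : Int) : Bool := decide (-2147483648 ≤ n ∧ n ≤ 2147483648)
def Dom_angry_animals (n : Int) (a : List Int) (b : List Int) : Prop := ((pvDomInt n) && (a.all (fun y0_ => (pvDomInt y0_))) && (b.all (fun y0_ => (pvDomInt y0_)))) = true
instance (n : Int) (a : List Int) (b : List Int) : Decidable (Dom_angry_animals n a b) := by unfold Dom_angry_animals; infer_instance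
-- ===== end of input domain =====

-- B replaces A's mutating enemy-set window bookkeeping with a max-lower-enemy table and one
-- monotonic left-pointer sweep (objective: simpler; same asymptotic cost).

-- ===== PORT A =====
-- enemies_dict.setdefault(y, set()).add(x)  ==  d[y] = d.get(y, set()).add(x)  == Dict.modify
def pvAEnemies (ps : List (Int × Int)) : PySem.Dict Int (PySem.Set Int) :=
  ps.foldl (fun d p =>
    PySem.Dict.modify d (max p.1 p.2) PySem.Set.empty
      (fun s => PySem.Set.add s (min p.1 p.2)))
    PySem.Dict.empty

-- the inner 'while' loop; Python's max(i_enemies) is only reached when the set is nonempty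
-- (the truthiness test short-circuits), so the 'none' arm exits exactly as Python does;
-- i_enemies.remove(e) has e ∈ s (e is its max), so the KeyError arm of remove? is unreachable.
def pvAWhile (endv : Int) (s : PySem.Set Int) (ini cnt : Int) : PySem.Set Int × Int × Int :=
  match PySem.List.max? s (fun x => x) with
  | none => (s, ini, cnt)
  | some e =>
    if h : endv > ini ∧ ini + 1 ≤ e ∧ endv ≥ e then
      let s' := if ini + 1 ≥ e then (PySem.Set.remove? s e).getD s else s
      pvAWhile endv s' (ini + 1) (cnt + (endv - (ini + 1)))
    else (s, ini, cnt)
termination_by (endv - ini).toNat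
decreasing_by omega

-- one iteration of the main for-loop; state (enemies_dict, ini, end, groups_count).
-- The write-back 'insert i r.1' models Python's in-place mutation of the aliased set
-- (only when the key is present: .get(i, set()) does not insert).
def pvAStep (st : PySem.Dict Int (PySem.Set Int) × Int × Int × Int) (i : Int) :
    PySem.Dict Int (PySem.Set Int) × Int × Int × Int :=
  let d := st.1; let ini := st.2.1; let endv := st.2.2.1; let cnt := st.2.2.2
  if endv ≤ ini then (d, ini, endv + 1, cnt + 1)
  else
    let r := pvAWhile endv (PySem.Dict.getD d i PySem.Set.empty) ini cnt
    let d' := if PySem.Dict.contains d i then PySem.Dict.insert d i r.1 else d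
    (d', r.2.1, endv + 1, r.2.2 + 1)

def angry_animals (n : Int) (a : List Int) (b : List Int) : Int :=
  let st := (PySem.List.pyRange 1 (n + 1) 1).foldl pvAStep (pvAEnemies (a.zip b), 0, 0, 0)
  let sz := st.2.2.1 - st.2.1
  st.2.2.2 + PySem.Int.floordiv (sz * (sz - 1)) 2

-- ===== PORT B =====
-- for each hi keep only the largest lower enemy lo
def pvBTable (ps : List (Int × Int)) : PySem.Dict Int Int :=
  ps.foldl (fun d p =>
    let lo := if p.1 < p.2 then p.1 else p.2
    let hi := if p.1 < p.2 then p.2 else p.1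
    match PySem.Dict.get? d hi with
    | none => PySem.Dict.insert d hi lo
    | some prev => if prev < lo then PySem.Dict.insert d hi lo else d)
    PySem.Dict.empty

-- one iteration of the sweep; state (left, count)
def pvBStep (d : PySem.Dict Int Int) (st : Int × Int) (r : Int) : Int × Int :=
  let left := match PySem.Dict.get? d r with
    | some e => if st.1 ≤ e ∧ e < r then e + 1 else st.1
    | none => st.1
  (left, st.2 + (r - left + 1))

def angry_animals_alt (n : Int) (a : List Int) (b : List Int) : Int :=
  ((PySem.List.pyRange 1 (n + 1) 1).foldl (pvBStep (pvBTable (a.zip b))) (1, 0)).2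

-- ===== PRECONDITION & SPEC =====
def Spec_angry_animals (n : Int) (a : List Int) (b : List Int) (out : Int) : Prop := out = angry_animals_alt n a b
instance (n : Int) (a : List Int) (b : List Int) (out : Int) : Decidable (Spec_angry_animals n a b out) := by unfold Spec_angry_animals; infer_instance

-- ===== CLAIM (what is proved, stated in full; the proofs are below) =====
def Claim_equal_angry_animals : Prop := ∀ (n : Int) (a : List Int) (b : List Int), Dom_angry_animals n a b → Spec_angry_animals n a b (angry_animals n a b)

-- ===== LEMMAS AND PROOFS =====

lemma pv_max_add (s : PySem.Set Int) (x : Int) :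
    PySem.List.max? (PySem.Set.add s x) (fun y => y) =
      some ((PySem.List.max? s (fun y => y)).elim x (fun m => max m x)) := by
  rw [PySem.Set.add_eq_ite]
  by_cases hx : x ∈ s
  · rw [if_pos hx]
    cases s with
    | nil => simp at hx
    | cons h t =>
      rw [PySem.List.max?_id_cons, Option.elim]
      have hle : x ≤ t.foldl max h := PySem.List.max?_isMax (PySem.List.max?_id_cons h t) x hx
      simp [max_eq_left hle]
  · rw [if_neg hx]
    cases s with
    | nil =>
      rw [show PySem.List.max? ([]:List Int) (fun y => y) = none from (PySem.List.max?_eq_none_iff _ _).2 rfl,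
        List.nil_append, PySem.List.max?_id_cons]
      rfl
    | cons h t =>
      rw [List.cons_append, PySem.List.max?_id_cons, PySem.List.max?_id_cons, Option.elim,
        List.foldl_append]
      simp

lemma pv_tables_aux (ps : List (Int × Int)) :
    ∀ (dA : PySem.Dict Int (PySem.Set Int)) (dB : PySem.Dict Int Int),
    (∀ k, PySem.List.max? (PySem.Dict.getD dA k PySem.Set.empty) (fun y => y) = PySem.Dict.get? dB k) →
    ∀ k, PySem.List.max? (PySem.Dict.getD
        (ps.foldl (fun d p => PySem.Dict.modify d (max p.1 p.2) PySem.Set.empty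
          (fun s => PySem.Set.add s (min p.1 p.2))) dA) k PySem.Set.empty) (fun y => y) =
      PySem.Dict.get? (ps.foldl (fun d p =>
        let lo := if p.1 < p.2 then p.1 else p.2
        let hi := if p.1 < p.2 then p.2 else p.1
        match PySem.Dict.get? d hi with
        | none => PySem.Dict.insert d hi lo
        | some prev => if prev < lo then PySem.Dict.insert d hi lo else d) dB) k := by
  induction ps with
  | nil => intro dA dB h k; exact h k
  | cons p ps ih =>
    intro dA dB h k
    simp only [List.foldl_cons]
    have hlo : (if p.1 < p.2 then p.1 else p.2) = min p.1 p.2 := by omega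
    have hhi : (if p.1 < p.2 then p.2 else p.1) = max p.1 p.2 := by omega
    set hi := max p.1 p.2 with hdefhi
    set lo := min p.1 p.2 with hdeflo
    apply ih
    intro j
    rw [PySem.Dict.getD_modify]
    by_cases hj : j = hi
    · subst hj
      rw [if_pos rfl, pv_max_add, hlo, hhi]
      rcases hB : PySem.Dict.get? dB hi with _ | prev
      · have := h hi; rw [hB] at this
        rw [this]
        simp [PySem.Dict.get?_insert_self]
      · have := h hi; rw [hB] at this
        rw [this]
        by_cases hc : prev < lo
        · simp only [Option.elim, if_pos hc, PySem.Dict.get?_insert_self]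
          rw [max_eq_right (le_of_lt hc)]
        · simp only [Option.elim, hB, if_neg hc]
          rw [max_eq_left (by omega)]
    · rw [if_neg hj, h j]
      rcases hB : PySem.Dict.get? dB hi with _ | prev
      · rw [hlo, hhi, hB]
        exact (PySem.Dict.get?_insert_of_ne _ _ hj).symm
      · rw [hlo, hhi, hB]
        by_cases hc : prev < lo
        · simp only [if_pos hc]
          exact (PySem.Dict.get?_insert_of_ne _ _ hj).symm
        · simp only [if_neg hc]


lemma pvAWhile_stop (endv : Int) (s : PySem.Set Int) (ini cnt : Int)
    (h : ∀ e, PySem.List.max? s (fun x => x) = some e → ¬ (endv > ini ∧ ini + 1 ≤ e ∧ endv ≥ e)) :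
    pvAWhile endv s ini cnt = (s, ini, cnt) := by
  rcases hm : PySem.List.max? s (fun x => x) with _ | e
  · rw [pvAWhile, hm]
  · rw [pvAWhile, hm]
    dsimp only
    rw [dif_neg (h e hm)]

lemma pvAWhile_run (endv e : Int) (s : PySem.Set Int) (hnd : s.Nodup)
    (hmax : PySem.List.max? s (fun x => x) = some e) (h3 : endv ≥ e) :
    ∀ (k : Nat) (ini cnt : Int), (e - ini - 1).toNat = k → endv > ini → ini + 1 ≤ e →
    ∃ s' c', pvAWhile endv s ini cnt = (s', e, c') ∧ s'.Nodup ∧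
      2 * c' = 2 * cnt + (endv - ini) * (endv - ini - 1) - (endv - e) * (endv - e - 1) := by
  intro k
  induction k with
  | zero =>
    intro ini cnt hk h1 h2
    have hie : ini + 1 = e := by omega
    have hmem : e ∈ s := PySem.List.max?_mem hmax
    rw [pvAWhile, hmax]
    dsimp only
    rw [dif_pos ⟨h1, h2, h3⟩]
    simp only [if_pos (ge_of_eq hie), PySem.Set.remove?_of_mem hmem, Option.getD_some]
    have hstop : pvAWhile endv (PySem.Set.discard s e) (ini + 1) (cnt + (endv - (ini + 1))) =
        (PySem.Set.discard s e, ini + 1, cnt + (endv - (ini + 1))) := by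
      apply pvAWhile_stop
      intro e2 hm2
      have hmem2 : e2 ∈ PySem.Set.discard s e := PySem.List.max?_mem hm2
      have hmem2' : e2 ∈ s ∧ e2 ≠ e := (PySem.Set.mem_discard _ _ _).1 hmem2
      have hle : e2 ≤ e := PySem.List.max?_isMax hmax e2 hmem2'.1
      have hne : e2 ≠ e := hmem2'.2
      intro hc; omega
    rw [hstop]
    refine ⟨PySem.Set.discard s e, cnt + (endv - (ini + 1)), by rw [hie],
      PySem.Set.nodup_discard _ _ hnd, ?_⟩
    have : ini = e - 1 := by omega
    subst this
    ring
  | succ k ih =>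
    intro ini cnt hk h1 h2
    have hlt : ini + 1 < e := by omega
    rw [pvAWhile, hmax]
    dsimp only
    rw [dif_pos ⟨h1, h2, h3⟩]
    simp only [if_neg (by omega : ¬ ini + 1 ≥ e)]
    obtain ⟨s', c', heq, hnd', hc⟩ := ih (ini + 1) (cnt + (endv - (ini + 1))) (by omega) (by omega) (by omega)
    exact ⟨s', c', heq, hnd', by linear_combination hc⟩

lemma pv_sim (dB : PySem.Dict Int Int) :
    ∀ (k : Nat) (hi i : Int), (hi - i).toNat = k →
    ∀ (dA : PySem.Dict Int (PySem.Set Int)) (ini endv cntA left cntB : Int),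
    endv = i - 1 → ini = left - 1 → 0 ≤ ini → ini ≤ endv →
    2 * cntB = 2 * cntA + (endv - ini) * (endv - ini - 1) →
    (∀ j, i ≤ j → PySem.List.max? (PySem.Dict.getD dA j PySem.Set.empty) (fun x => x) = PySem.Dict.get? dB j) →
    (∀ j, (PySem.Dict.getD dA j PySem.Set.empty).Nodup) →
    (let stA := (PySem.List.pyRange i hi 1).foldl pvAStep (dA, ini, endv, cntA)
     let stB := (PySem.List.pyRange i hi 1).foldl (pvBStep dB) (left, cntB)
     2 * stB.2 = 2 * stA.2.2.2 + (stA.2.2.1 - stA.2.1) * (stA.2.2.1 - stA.2.1 - 1)) := by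
  intro k
  induction k with
  | zero =>
    intro hi i hk dA ini endv cntA left cntB h1 h2 h3 h4 h5 h6 h7
    rw [PySem.List.pyRange_one_eq_nil (by omega)]
    simpa using h5
  | succ k ih =>
    intro hi i hk dA ini endv cntA left cntB h1 h2 h3 h4 h5 h6 h7
    have hlt : i < hi := by omega
    rw [PySem.List.pyRange_one_cons hlt]
    simp only [List.foldl_cons]
    subst h1 h2
    by_cases hb : i - 1 ≤ (left - 1)
    · -- bootstrap branch: window empty ((left - 1) = end)
      have hL : left = i := by omega
      have hstepA : pvAStep (dA, (left - 1), i - 1, cntA) i = (dA, (left - 1), i - 1 + 1, cntA + 1) := by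
        simp only [pvAStep, if_pos hb]
      have hstepB : pvBStep dB (left, cntB) i = (left, cntB + (i - left + 1)) := by
        rcases hB : PySem.Dict.get? dB i with _ | e
        · simp only [pvBStep, hB]
        · simp only [pvBStep, hB, if_neg (by omega : ¬ (left ≤ e ∧ e < i))]
      rw [hstepA, hstepB]
      exact ih hi (i + 1) (by omega) dA (left - 1) (i - 1 + 1) (cntA + 1) left (cntB + (i - left + 1))
        (by omega) (by omega) h3 (by omega) (by linear_combination h5)
        (fun j hj => h6 j (by omega)) h7
    · -- window nonempty
      have hmaxi := h6 i le_rfl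
      rcases hB : PySem.Dict.get? dB i with _ | e
      · -- no enemies recorded for i
        rw [hB] at hmaxi
        have hstop := pvAWhile_stop (i - 1) (PySem.Dict.getD dA i PySem.Set.empty) (left - 1) cntA
          (by intro e hm; rw [hmaxi] at hm; cases hm)
        have hstepA : pvAStep (dA, (left - 1), i - 1, cntA) i =
            ((if PySem.Dict.contains dA i then PySem.Dict.insert dA i (PySem.Dict.getD dA i PySem.Set.empty) else dA),
              (left - 1), i - 1 + 1, cntA + 1) := by
          simp only [pvAStep, if_neg hb, hstop]
        have hstepB : pvBStep dB (left, cntB) i = (left, cntB + (i - left + 1)) := by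
          simp only [pvBStep, hB]
        rw [hstepA, hstepB]
        have hd' : ∀ j, PySem.Dict.getD
            (if PySem.Dict.contains dA i then PySem.Dict.insert dA i (PySem.Dict.getD dA i PySem.Set.empty) else dA)
            j PySem.Set.empty = PySem.Dict.getD dA j PySem.Set.empty := by
          intro j
          by_cases hc : PySem.Dict.contains dA i
          · rw [if_pos hc, PySem.Dict.getD_insert]
            split_ifs with hj
            · subst hj; rfl
            · rfl
          · rw [if_neg hc]
        exact ih hi (i + 1) (by omega) _ (left - 1) (i - 1 + 1) (cntA + 1) left (cntB + (i - left + 1))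
          (by omega) (by omega) h3 (by omega) (by linear_combination h5)
          (fun j hj => by rw [hd' j]; exact h6 j (by omega))
          (fun j => by rw [hd' j]; exact h7 j)
      · -- an enemy table entry e for i
        rw [hB] at hmaxi
        by_cases hcond : left ≤ e ∧ e < i
        · obtain ⟨s', c', heq, hnd', hc⟩ := pvAWhile_run (i - 1) e _ (h7 i) hmaxi (by omega)
            (e - (left - 1) - 1).toNat (left - 1) cntA rfl (by omega) (by omega)
          have hstepA : pvAStep (dA, (left - 1), i - 1, cntA) i =
              ((if PySem.Dict.contains dA i then PySem.Dict.insert dA i s' else dA),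
                e, i - 1 + 1, c' + 1) := by
            simp only [pvAStep, if_neg hb, heq]
          have hstepB : pvBStep dB (left, cntB) i = (e + 1, cntB + (i - (e + 1) + 1)) := by
            simp only [pvBStep, hB, if_pos hcond]
          rw [hstepA, hstepB]
          have hd' : ∀ j, j ≠ i → PySem.Dict.getD
              (if PySem.Dict.contains dA i then PySem.Dict.insert dA i s' else dA)
              j PySem.Set.empty = PySem.Dict.getD dA j PySem.Set.empty := by
            intro j hj
            by_cases hc2 : PySem.Dict.contains dA i
            · rw [if_pos hc2, PySem.Dict.getD_insert, if_neg hj]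
            · rw [if_neg hc2]
          have hd'i : (PySem.Dict.getD
              (if PySem.Dict.contains dA i then PySem.Dict.insert dA i s' else dA)
              i PySem.Set.empty).Nodup := by
            by_cases hc2 : PySem.Dict.contains dA i
            · rw [if_pos hc2, PySem.Dict.getD_insert, if_pos rfl]; exact hnd'
            · rw [if_neg hc2]; exact h7 i
          exact ih hi (i + 1) (by omega) _ e (i - 1 + 1) (c' + 1) (e + 1) (cntB + (i - (e + 1) + 1))
            (by omega) (by omega) (by omega) (by omega) (by linear_combination h5 - hc)
            (fun j hj => by rw [hd' j (by omega)]; exact h6 j (by omega))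
            (fun j => by
              by_cases hj : j = i
              · subst hj; exact hd'i
              · rw [hd' j hj]; exact h7 j)
        · have hstop := pvAWhile_stop (i - 1) (PySem.Dict.getD dA i PySem.Set.empty) (left - 1) cntA
            (by intro e2 hm; rw [hmaxi] at hm; injection hm with hm; subst hm; intro hcc; omega)
          have hstepA : pvAStep (dA, (left - 1), i - 1, cntA) i =
              ((if PySem.Dict.contains dA i then PySem.Dict.insert dA i (PySem.Dict.getD dA i PySem.Set.empty) else dA),
                (left - 1), i - 1 + 1, cntA + 1) := by
            simp only [pvAStep, if_neg hb, hstop]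
          have hstepB : pvBStep dB (left, cntB) i = (left, cntB + (i - left + 1)) := by
            simp only [pvBStep, hB, if_neg hcond]
          rw [hstepA, hstepB]
          have hd' : ∀ j, PySem.Dict.getD
              (if PySem.Dict.contains dA i then PySem.Dict.insert dA i (PySem.Dict.getD dA i PySem.Set.empty) else dA)
              j PySem.Set.empty = PySem.Dict.getD dA j PySem.Set.empty := by
            intro j
            by_cases hc : PySem.Dict.contains dA i
            · rw [if_pos hc, PySem.Dict.getD_insert]
              split_ifs with hj
              · subst hj; rfl
              · rfl
            · rw [if_neg hc]
          exact ih hi (i + 1) (by omega) _ (left - 1) (i - 1 + 1) (cntA + 1) left (cntB + (i - left + 1))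
            (by omega) (by omega) h3 (by omega) (by linear_combination h5)
            (fun j hj => by rw [hd' j]; exact h6 j (by omega))
            (fun j => by rw [hd' j]; exact h7 j)


lemma pv_nodup_aux (ps : List (Int × Int)) :
    ∀ (dA : PySem.Dict Int (PySem.Set Int)),
    (∀ k, (PySem.Dict.getD dA k PySem.Set.empty).Nodup) →
    ∀ k, ((ps.foldl (fun d p => PySem.Dict.modify d (max p.1 p.2) PySem.Set.empty
      (fun s => PySem.Set.add s (min p.1 p.2))) dA).getD k PySem.Set.empty).Nodup := by
  induction ps with
  | nil => intro dA h k; exact h k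
  | cons p ps ih =>
    intro dA h k
    simp only [List.foldl_cons]
    apply ih
    intro j
    rw [PySem.Dict.getD_modify]
    split_ifs with hj
    · exact PySem.Set.nodup_add _ _ (h _)
    · exact h j

lemma pv_base (k : Int) :
    PySem.List.max? (PySem.Dict.getD (PySem.Dict.empty : PySem.Dict Int (PySem.Set Int)) k PySem.Set.empty)
      (fun y => y) = PySem.Dict.get? (PySem.Dict.empty : PySem.Dict Int Int) k := by
  rw [PySem.Dict.getD_empty, PySem.Dict.get?_empty]
  exact (PySem.List.max?_eq_none_iff _ _).2 rfl

lemma pv_tables (ps : List (Int × Int)) (k : Int) :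
    PySem.List.max? (PySem.Dict.getD (pvAEnemies ps) k PySem.Set.empty) (fun y => y) =
      PySem.Dict.get? (pvBTable ps) k := by
  unfold pvAEnemies pvBTable
  exact pv_tables_aux ps PySem.Dict.empty PySem.Dict.empty pv_base k

lemma pv_tables_nodup (ps : List (Int × Int)) (k : Int) :
    (PySem.Dict.getD (pvAEnemies ps) k PySem.Set.empty).Nodup := by
  unfold pvAEnemies
  apply pv_nodup_aux
  intro j
  rw [PySem.Dict.getD_empty]
  exact List.nodup_nil

-- ===== VERDICT (by name: the statement is the Claim_ definition above) =====
theorem angry_animals_spec : Claim_equal_angry_animals := by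
  intro n a b _
  unfold Spec_angry_animals angry_animals angry_animals_alt
  have hsim := pv_sim (pvBTable (a.zip b)) ((n + 1) - 1).toNat (n + 1) 1 rfl
    (pvAEnemies (a.zip b)) 0 0 0 1 0 (by ring) (by ring) le_rfl le_rfl (by ring)
    (fun j _ => pv_tables (a.zip b) j) (fun j => pv_tables_nodup (a.zip b) j)
  dsimp only at hsim ⊢
  set stA := (PySem.List.pyRange 1 (n + 1) 1).foldl pvAStep (pvAEnemies (a.zip b), 0, 0, 0) with hA
  set stB := (PySem.List.pyRange 1 (n + 1) 1).foldl (pvBStep (pvBTable (a.zip b))) (1, 0) with hBdef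
  set sz := stA.2.2.1 - stA.2.1 with hsz
  have h2 : sz * (sz - 1) = 2 * (stB.2 - stA.2.2.2) := by linarith
  rw [h2, PySem.Int.floordiv_eq_ediv_of_pos (by norm_num), Int.mul_ediv_cancel_left _ two_ne_zero]
  ring
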